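-- pv_equiv track=rewrite | github.com/samarthya/ad688-scratch | src/analytics/ai_ml_location_analysis.py | get_matching_ai_ml_skills
-- ===== SOURCE A (Python) =====
-- from typing import List, Dict, Tuple
--
-- AI_ML_KEYWORDS = [
--     # Core AI/ML
--     'artificial intelligence', 'machine learning', 'deep learning', 'neural network',
--     'ai', 'ml', 'nlp', 'natural language processing', 'computer vision',
--
--     # Data Science
--     'data science', 'data scientist', 'predictive modeling', 'statistical modeling',
--     'advanced analytics', 'predictive analytics', 'statistical analysis',
--
--     # ML Techniques
--     'supervised learning', 'unsupervised learning', 'reinforcement learning',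
--     'classification', 'regression', 'clustering', 'recommendation system',
--     'time series', 'forecasting', 'anomaly detection',
--
--     # ML Frameworks & Tools
--     'tensorflow', 'pytorch', 'keras', 'scikit-learn', 'spark mllib',
--     'xgboost', 'lightgbm', 'catboost',
--
--     # ML Operations
--     'mlops', 'ml ops', 'model deployment', 'feature engineering',
--     'model training', 'hyperparameter tuning',
--
--     # Big Data ML
--     'distributed machine learning', 'scalable machine learning',
--     'big data analytics', 'data mining',
--
--     # Specific Domains
--     'generative ai', 'llm', 'large language model', 'chatbot', 'conversational ai',
--     'image recognition', 'speech recognition', 'sentiment analysis'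
-- ]
--
-- def get_matching_ai_ml_skills(skills_list: List[str], keywords: List[str] = AI_ML_KEYWORDS) -> List[str]:
--     """
--     Get list of AI/ML skills that match keywords.
--
--     Args:
--         skills_list: List of skill strings (lowercase)
--         keywords: List of AI/ML keywords to search for
--
--     Returns:
--         List of matching skills
--     """
--     if not skills_list:
--         return []
--
--     matching_skills = []
--     for skill in skills_list:
--         for keyword in keywords:
--             if keyword.lower() in skill.lower():
--                 matching_skills.append(skill)
--                 break
--
--     return matching_skills
-- ===== SOURCE B (Python) =====
-- from typing import List
--
-- AI_ML_KEYWORDS = [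
--     'artificial intelligence', 'machine learning', 'deep learning', 'neural network',
--     'ai', 'ml', 'nlp', 'natural language processing', 'computer vision',
--     'data science', 'data scientist', 'predictive modeling', 'statistical modeling',
--     'advanced analytics', 'predictive analytics', 'statistical analysis',
--     'supervised learning', 'unsupervised learning', 'reinforcement learning',
--     'classification', 'regression', 'clustering', 'recommendation system',
--     'time series', 'forecasting', 'anomaly detection',
--     'tensorflow', 'pytorch', 'keras', 'scikit-learn', 'spark mllib',
--     'xgboost', 'lightgbm', 'catboost',
--     'mlops', 'ml ops', 'model deployment', 'feature engineering',
--     'model training', 'hyperparameter tuning',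
--     'distributed machine learning', 'scalable machine learning',
--     'big data analytics', 'data mining',
--     'generative ai', 'llm', 'large language model', 'chatbot', 'conversational ai',
--     'image recognition', 'speech recognition', 'sentiment analysis'
-- ]
--
-- def get_matching_ai_ml_skills(skills_list: List[str], keywords: List[str] = AI_ML_KEYWORDS) -> List[str]:
--     # Keyword-major sweep: lowercase each skill and each keyword exactly once,
--     # mark matched skills in a parallel boolean vector, then emit marked skills in order.
--     lowered = [s.lower() for s in skills_list]
--     matched = [False] * len(skills_list)
--     for kw in keywords:
--         k = kw.lower()
--         matched = [m or k in s for m, s in zip(matched, lowered)]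
--     return [skill for skill, m in zip(skills_list, matched) if m]
-- ===== Notes on version B (the rewrite author's own statement) =====
-- stated objective: alternative
-- what changed: Replaces A's skill-major scan with early-exit inner keyword loop by a keyword-major sweep that lowercases each skill and keyword exactly once and marks hits in a parallel boolean vector, emitting marked skills at the end.
import Mathlib
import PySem

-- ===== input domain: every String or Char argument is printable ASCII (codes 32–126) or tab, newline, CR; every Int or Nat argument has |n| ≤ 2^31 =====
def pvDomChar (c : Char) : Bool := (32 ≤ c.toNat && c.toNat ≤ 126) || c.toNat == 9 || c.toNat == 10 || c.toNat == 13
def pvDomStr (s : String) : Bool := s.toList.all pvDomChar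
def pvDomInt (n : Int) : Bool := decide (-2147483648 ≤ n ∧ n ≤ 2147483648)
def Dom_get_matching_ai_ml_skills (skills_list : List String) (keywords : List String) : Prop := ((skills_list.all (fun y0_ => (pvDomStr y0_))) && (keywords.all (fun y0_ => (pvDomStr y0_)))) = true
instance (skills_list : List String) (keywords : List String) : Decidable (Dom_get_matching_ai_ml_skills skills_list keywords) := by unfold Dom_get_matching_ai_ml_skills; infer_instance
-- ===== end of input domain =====

-- B replaces A's skill-major scan (which re-lowercases every keyword for every skill) by a
-- keyword-major sweep over a boolean match vector, lowercasing each string exactly once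
-- (objective: alternative traversal; same return value).

-- ===== PORT A =====
-- inner 'for keyword in keywords: if keyword.lower() in skill.lower(): append; break'
def pvInnerA (skill : String) (acc : List String) : List String → List String
  | [] => acc
  | k :: ks =>
      if PySem.Str.isIn (PySem.Str.lower k) (PySem.Str.lower skill) then acc ++ [skill]
      else pvInnerA skill acc ks

def get_matching_ai_ml_skills (skills_list : List String) (keywords : List String) : List String :=
  if skills_list = [] then []
  else skills_list.foldl (fun acc skill => pvInnerA skill acc keywords) []

-- ===== PORT B =====
def get_matching_ai_ml_skills_alt (skills_list : List String) (keywords : List String) : List String :=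
  let lowered := skills_list.map PySem.Str.lower
  let matched := keywords.foldl
    (fun m kw =>
      let k := PySem.Str.lower kw
      List.zipWith (fun b s => b || PySem.Str.isIn k s) m lowered)
    (List.replicate skills_list.length false)
  ((skills_list.zip matched).filter (fun p => p.2)).map (fun p => p.1)

-- ===== PRECONDITION & SPEC =====
def Spec_get_matching_ai_ml_skills (skills_list : List String) (keywords : List String) (out : List String) : Prop := out = get_matching_ai_ml_skills_alt skills_list keywords
instance (skills_list : List String) (keywords : List String) (out : List String) : Decidable (Spec_get_matching_ai_ml_skills skills_list keywords out) := by unfold Spec_get_matching_ai_ml_skills; infer_instance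

-- ===== CLAIM (what is proved, stated in full; the proofs are below) =====
def Claim_equal_get_matching_ai_ml_skills : Prop := ∀ (skills_list : List String) (keywords : List String), Dom_get_matching_ai_ml_skills skills_list keywords → Spec_get_matching_ai_ml_skills skills_list keywords (get_matching_ai_ml_skills skills_list keywords)

-- ===== LEMMAS AND PROOFS =====

-- the Bool predicate both programs decide for each skill
def pvHit (keywords : List String) (skill : String) : Bool :=
  keywords.any (fun k => PySem.Str.isIn (PySem.Str.lower k) (PySem.Str.lower skill))

-- A's inner loop appends the skill iff some keyword hits
theorem pvInnerA_eq (skill : String) (acc : List String) (ks : List String) :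
    pvInnerA skill acc ks = if pvHit ks skill then acc ++ [skill] else acc := by
  induction ks with
  | nil => simp [pvInnerA, pvHit]
  | cons k ks ih =>
      cases h : PySem.Str.isIn (PySem.Str.lower k) (PySem.Str.lower skill) with
      | true =>
          simp only [PySem.Str.isIn_eq, PySem.Str.toList_lower] at h
          simp [pvInnerA, pvHit, h]
      | false =>
          simp only [PySem.Str.isIn_eq, PySem.Str.toList_lower] at h
          simp [pvInnerA, pvHit, h, ih]

-- A is the filter by pvHit
theorem portA_eq_filter (skills_list keywords : List String) :
    get_matching_ai_ml_skills skills_list keywords = skills_list.filter (pvHit keywords) := by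
  unfold get_matching_ai_ml_skills
  by_cases h : skills_list = []
  · simp [h]
  · rw [if_neg h]
    have hf : (fun (acc : List String) (skill : String) => pvInnerA skill acc keywords)
        = fun acc skill => if pvHit keywords skill then acc ++ [skill] else acc := by
      funext acc skill; exact pvInnerA_eq skill acc keywords
    rw [hf]
    have := PySem.List.foldl_append_if (pvHit keywords) (id : String → String) skills_list []
    simpa using this

theorem zipWith_zipWith (f g : Bool → String → Bool) (m : List Bool) (l : List String) :
    List.zipWith f (List.zipWith g m l) l
      = List.zipWith (fun b s => f (g b s) s) m l := by
  induction m generalizing l with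
  | nil => simp
  | cons b m ih => cases l with
      | nil => simp
      | cons s l => simp [ih]

theorem zipWith_left (m : List Bool) (l : List String) (h : m.length = l.length) :
    List.zipWith (fun b _ => b) m l = m := by
  induction m generalizing l with
  | nil => simp
  | cons b m ih => cases l with
      | nil => simp at h
      | cons s l => simp at h; simp [ih l h]

-- B's keyword fold computes, pointwise, "old flag or some keyword hits"
theorem foldB_eq (ks : List String) (lowered : List String) (m : List Bool)
    (hm : m.length = lowered.length) :
    ks.foldl (fun m kw =>
        List.zipWith (fun b s => b || PySem.Str.isIn (PySem.Str.lower kw) s) m lowered) m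
      = List.zipWith
          (fun b s => b || ks.any (fun kw => PySem.Str.isIn (PySem.Str.lower kw) s)) m lowered := by
  induction ks generalizing m with
  | nil =>
      simp only [List.foldl_nil, List.any_nil, Bool.or_false]
      exact (zipWith_left m lowered hm).symm
  | cons k ks ih =>
      simp only [List.foldl_cons]
      rw [ih _ (by simp [hm]), zipWith_zipWith]
      congr 1
      funext b s
      simp [Bool.or_assoc]

theorem zipWith_replicate_map (skills : List String) (p : String → Bool) :
    List.zipWith (fun b s => b || p s) (List.replicate skills.length false)
        (skills.map PySem.Str.lower)
      = skills.map (fun sk => p (PySem.Str.lower sk)) := by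
  induction skills with
  | nil => rfl
  | cons s l ih => simp [List.replicate_succ, ih]

theorem zip_map_filter (skills : List String) (q : String → Bool) :
    ((skills.zip (skills.map q)).filter (fun p => p.2)).map (fun p => p.1)
      = skills.filter q := by
  induction skills with
  | nil => rfl
  | cons s l ih =>
      by_cases h : q s = true <;> simp [h, ih]

theorem portB_eq_filter (skills_list keywords : List String) :
    get_matching_ai_ml_skills_alt skills_list keywords = skills_list.filter (pvHit keywords) := by
  unfold get_matching_ai_ml_skills_alt
  simp only
  rw [foldB_eq _ _ _ (by simp), zipWith_replicate_map, zip_map_filter]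
  rfl

-- ===== VERDICT (by name: the statement is the Claim_ definition above) =====
theorem get_matching_ai_ml_skills_spec : Claim_equal_get_matching_ai_ml_skills := by
  intro skills_list keywords _
  unfold Spec_get_matching_ai_ml_skills
  rw [portA_eq_filter, portB_eq_filter]
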